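-- pv_equiv track=rewrite | github.com/hwanginbeom/algorithm_study | 2.algorithm_test/20.11.22/20.11.22_Seonyeong.py | solution
-- ===== SOURCE A (Python) =====
-- def solution(N, number):
--     answer = -1
--     s = [set() for x in range(8)]
--
--     for i, x in enumerate(s, start=1):
--         x.add(int(str(N)*i))
--
--     for i in range(1, len(s)):
--         for j in range(i):
--             for a in s[j]:
--                 for b in s[i-j-1]:
--                     s[i].add(a+b)
--                     s[i].add(a-b)
--                     s[i].add(a*b)
--                     if b != 0:
--                         s[i].add(a//b)
--         if number in s[i]:
--             answer = i + 1
--             break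
--
--     return answer
-- ===== SOURCE B (Python) =====
-- def solution(N, number):
--     # Top-down memoized recursion: reachable(k) = set of values expressible with exactly k copies of N.
--     memo = {}
--
--     def reachable(k):
--         if k in memo:
--             return memo[k]
--         vals = {int(str(N) * k)}
--         for a in range(1, k):
--             for x in reachable(a):
--                 for y in reachable(k - a):
--                     vals.add(x + y)
--                     vals.add(x - y)
--                     vals.add(x * y)
--                     if y != 0:
--                         vals.add(x // y)
--         memo[k] = vals
--         return vals
--
--     for k in range(2, 9):
--         if number in reachable(k):
--             return k
--     return -1
-- ===== Notes on version B (the rewrite author's own statement) =====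
-- stated objective: alternative
-- what changed: Replaces the in-place 8-slot table of sets filled by a triangular bottom-up loop with a break, by a top-down memoized recursion reachable(k) over the number of copies, scanned by an early-returning loop k=2..8.
import Mathlib
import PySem

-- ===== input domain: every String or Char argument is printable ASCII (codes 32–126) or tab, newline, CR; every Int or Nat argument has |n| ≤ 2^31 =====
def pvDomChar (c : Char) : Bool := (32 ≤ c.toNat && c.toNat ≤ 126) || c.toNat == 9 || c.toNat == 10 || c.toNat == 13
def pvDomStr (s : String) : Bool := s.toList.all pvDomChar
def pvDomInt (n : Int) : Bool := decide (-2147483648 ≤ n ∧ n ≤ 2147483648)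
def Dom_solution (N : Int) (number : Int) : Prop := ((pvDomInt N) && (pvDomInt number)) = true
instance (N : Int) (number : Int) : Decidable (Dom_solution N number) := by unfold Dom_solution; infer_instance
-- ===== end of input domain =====

-- B replaces A's in-place 8-slot table filled bottom-up with a break by a top-down
-- recursion reachable(k) over the number of copies (memoized in Python), scanned by an
-- early-returning loop k = 2..8; objective: alternative decomposition, same cost.
--
-- Python's `set` of ints is modelled here by `Std.TreeSet Int`: it holds exactly the
-- distinct inserted elements, so it is membership-exact for Python's set; the returned
-- Int depends only on set membership, never on iteration order (the proofs below go
-- through membership characterisations only). A list-backed set model evaluates the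
-- same values but not within the evaluation budget on these set sizes.

-- int(str(N)*k), shared by both ports (both Pythons contain this exact expression);
-- `.getD 0` is never reached under Pre_solution (0 ≤ N makes the parse succeed).
def repInt (N : Int) (k : Nat) : Int :=
  (PySem.Int.ofChars? (PySem.List.pyRepeat (PySem.Int.toChars N) (k : Int))).getD 0

-- ===== PORT A =====
-- s = [set() for x in range(8)]; for i,x in enumerate(s,1): x.add(int(str(N)*i))
def pvInitA (N : Int) : List (Std.TreeSet Int) :=
  (List.range 8).map (fun i => Std.TreeSet.empty.insert (repInt N (i + 1)))

-- the body of the outer `for i in range(1, len(s))` before the membership test: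
-- for j in range(i): for a in s[j]: for b in s[i-j-1]: the four adds
def pvBuildA (s : List (Std.TreeSet Int)) (i : Nat) : Std.TreeSet Int :=
  (List.range i).foldl (fun cur j =>
    ((s.getD j Std.TreeSet.empty).toList).foldl (fun cur a =>
      ((s.getD (i - j - 1) Std.TreeSet.empty).toList).foldl (fun cur b =>
        let cur := cur.insert (a + b)
        let cur := cur.insert (a - b)
        let cur := cur.insert (a * b)
        if b ≠ 0 then cur.insert (PySem.Int.floordiv a b) else cur) cur) cur)
    (s.getD i Std.TreeSet.empty)

-- the outer loop with `answer = i + 1; break`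
def pvLoopA (number : Int) (s : List (Std.TreeSet Int)) (i : Nat) : Int :=
  if i < 8 then
    let si := pvBuildA s i
    if number ∈ si then (i : Int) + 1
    else pvLoopA number (s.set i si) (i + 1)
  else -1
termination_by 8 - i

def solution (N : Int) (number : Int) : Int :=
  pvLoopA number (pvInitA N) 1

-- ===== PORT B =====
-- reachable(k): vals = {int(str(N)*k)}; for a in range(1,k): combine reachable(a), reachable(k-a).
-- (The Python memo dict is a pure cache; the recursion computes the same sets.)
def pvReach (N : Int) (k : Nat) : Std.TreeSet Int :=
  (List.range' 1 (k - 1)).attach.foldl (fun vals a =>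
    ((pvReach N a.1).toList).foldl (fun vals x =>
      ((pvReach N (k - a.1)).toList).foldl (fun vals y =>
        let vals := vals.insert (x + y)
        let vals := vals.insert (x - y)
        let vals := vals.insert (x * y)
        if y ≠ 0 then vals.insert (PySem.Int.floordiv x y) else vals) vals) vals)
    (Std.TreeSet.empty.insert (repInt N k))
termination_by k
decreasing_by
  · have := a.2; rw [List.mem_range'_1] at this; omega
  · have := a.2; rw [List.mem_range'_1] at this; omega

-- for k in range(2, 9): if number in reachable(k): return k ... return -1
def pvFindB (N : Int) (number : Int) (k : Nat) : Int :=
  if k < 9 then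
    if number ∈ pvReach N k then (k : Int) else pvFindB N number (k + 1)
  else -1
termination_by 9 - k

def solution_alt (N : Int) (number : Int) : Int :=
  pvFindB N number 2

-- ===== PRECONDITION & SPEC =====
-- Pre_ excludes N < 0, where Python A raises ValueError (int("-3-3") from str(N)*i).
def Pre_solution (N : Int) (number : Int) : Prop := 0 ≤ N
instance (N : Int) (number : Int) : Decidable (Pre_solution N number) := by
  unfold Pre_solution; infer_instance

def pvWitness_solution : Int × Int := (5, 12)

def Spec_solution (N : Int) (number : Int) (out : Int) : Prop := out = solution_alt N number
instance (N : Int) (number : Int) (out : Int) : Decidable (Spec_solution N number out) := by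
  unfold Spec_solution; infer_instance

-- ===== CLAIM (what is proved, stated in full; the proofs are below) =====
def Claim_equal_solution : Prop := ∀ (N : Int) (number : Int), Dom_solution N number → Pre_solution N number → Spec_solution N number (solution N number)

-- ===== LEMMAS AND PROOFS =====

-- the values one (a, b) pair contributes
def pvOps (a b : Int) : List Int :=
  [a + b, a - b, a * b] ++ (if b ≠ 0 then [PySem.Int.floordiv a b] else [])

-- the common four-add step (both ports' inner bodies are definitionally this)
def pvStep (cur : Std.TreeSet Int) (a b : Int) : Std.TreeSet Int :=
  let cur := cur.insert (a + b)
  let cur := cur.insert (a - b)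
  let cur := cur.insert (a * b)
  if b ≠ 0 then cur.insert (PySem.Int.floordiv a b) else cur

theorem mem_insertI (t : Std.TreeSet Int) (v x : Int) :
    x ∈ t.insert v ↔ x = v ∨ x ∈ t := by
  rw [Std.TreeSet.mem_insert]
  simp
  exact ⟨fun h => h.imp Eq.symm id, fun h => h.imp Eq.symm id⟩

theorem mem_singletonI (v x : Int) :
    x ∈ (Std.TreeSet.empty.insert v : Std.TreeSet Int) ↔ x = v := by
  rw [mem_insertI]
  simp

theorem mem_pvStep (cur : Std.TreeSet Int) (a b c : Int) :
    c ∈ pvStep cur a b ↔ c ∈ cur ∨ c ∈ pvOps a b := by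
  by_cases hb : b ≠ 0 <;>
    simp [pvStep, pvOps, hb] <;> tauto

theorem mem_foldl_inner (Y : List Int) (acc : Std.TreeSet Int) (a c : Int) :
    c ∈ Y.foldl (fun cur b => pvStep cur a b) acc ↔
      c ∈ acc ∨ ∃ b ∈ Y, c ∈ pvOps a b := by
  induction Y generalizing acc with
  | nil => simp
  | cons y ys ih =>
    simp only [List.foldl_cons, ih, mem_pvStep, List.mem_cons]
    constructor
    · rintro ((h | h) | ⟨b, hb, h⟩)
      · exact Or.inl h
      · exact Or.inr ⟨y, Or.inl rfl, h⟩
      · exact Or.inr ⟨b, Or.inr hb, h⟩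
    · rintro (h | ⟨b, (rfl | hb), h⟩)
      · exact Or.inl (Or.inl h)
      · exact Or.inl (Or.inr h)
      · exact Or.inr ⟨b, hb, h⟩

theorem mem_foldl_outer {ι : Type} (js : List ι) (X Y : ι → List Int)
    (acc : Std.TreeSet Int) (c : Int) :
    c ∈ js.foldl (fun cur j =>
        (X j).foldl (fun cur a => (Y j).foldl (fun cur b => pvStep cur a b) cur) cur) acc ↔
      c ∈ acc ∨ ∃ j ∈ js, ∃ a ∈ X j, ∃ b ∈ Y j, c ∈ pvOps a b := by
  induction js generalizing acc with
  | nil => simp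
  | cons j js ih =>
    have hmid : ∀ (X0 Y0 : List Int) (acc0 : Std.TreeSet Int),
        c ∈ X0.foldl (fun cur a => Y0.foldl (fun cur b => pvStep cur a b) cur) acc0 ↔
          c ∈ acc0 ∨ ∃ a ∈ X0, ∃ b ∈ Y0, c ∈ pvOps a b := by
      intro X0 Y0 acc0
      induction X0 generalizing acc0 with
      | nil => simp
      | cons x xs ihx =>
        simp only [List.foldl_cons, ihx, mem_foldl_inner, List.mem_cons]
        constructor
        · rintro ((h | ⟨b, hb, h⟩) | ⟨a, ha, hrest⟩)
          · exact Or.inl h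
          · exact Or.inr ⟨x, Or.inl rfl, b, hb, h⟩
          · exact Or.inr ⟨a, Or.inr ha, hrest⟩
        · rintro (h | ⟨a, (rfl | ha), hrest⟩)
          · exact Or.inl (Or.inl h)
          · exact Or.inl (Or.inr hrest)
          · exact Or.inr ⟨a, ha, hrest⟩
    simp only [List.foldl_cons, ih, hmid, List.mem_cons]
    constructor
    · rintro ((h | h) | ⟨j', hj', h⟩)
      · exact Or.inl h
      · exact Or.inr ⟨j, Or.inl rfl, h⟩
      · exact Or.inr ⟨j', Or.inr hj', h⟩
    · rintro (h | ⟨j', (rfl | hj'), h⟩)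
      · exact Or.inl (Or.inl h)
      · exact Or.inl (Or.inr h)
      · exact Or.inr ⟨j', hj', h⟩

theorem mem_pvBuildA (s : List (Std.TreeSet Int)) (i : Nat) (c : Int) :
    c ∈ pvBuildA s i ↔
      c ∈ s.getD i Std.TreeSet.empty ∨
        ∃ j ∈ List.range i, ∃ a ∈ s.getD j Std.TreeSet.empty,
          ∃ b ∈ s.getD (i - j - 1) Std.TreeSet.empty, c ∈ pvOps a b := by
  have h := mem_foldl_outer (List.range i)
    (fun j => (s.getD j Std.TreeSet.empty).toList)
    (fun j => (s.getD (i - j - 1) Std.TreeSet.empty).toList)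
    (s.getD i Std.TreeSet.empty) c
  simp only [Std.TreeSet.mem_toList] at h
  exact h

theorem mem_pvReach (N : Int) (k : Nat) (c : Int) :
    c ∈ pvReach N k ↔
      c = repInt N k ∨
        ∃ a, 1 ≤ a ∧ a < k ∧ ∃ x ∈ pvReach N a, ∃ y ∈ pvReach N (k - a), c ∈ pvOps x y := by
  rw [pvReach]
  rw [show (List.foldl (fun vals (a : {x // x ∈ List.range' 1 (k - 1)}) =>
        List.foldl (fun vals x =>
          List.foldl (fun vals y =>
            let vals := vals.insert (x + y)
            let vals := vals.insert (x - y)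
            let vals := vals.insert (x * y)
            if y ≠ 0 then vals.insert (PySem.Int.floordiv x y) else vals) vals
            ((pvReach N (k - a.1)).toList)) vals ((pvReach N a.1).toList))
        (Std.TreeSet.empty.insert (repInt N k)) (List.range' 1 (k - 1)).attach)
      = (List.range' 1 (k - 1)).attach.foldl (fun cur a =>
          ((pvReach N a.1).toList).foldl (fun cur x =>
            ((pvReach N (k - a.1)).toList).foldl (fun cur y => pvStep cur x y) cur) cur)
        (Std.TreeSet.empty.insert (repInt N k)) from rfl]
  rw [mem_foldl_outer ((List.range' 1 (k - 1)).attach)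
      (fun a => (pvReach N a.1).toList) (fun a => (pvReach N (k - a.1)).toList)]
  simp only [Std.TreeSet.mem_toList, mem_singletonI]
  constructor
  · rintro (h | ⟨⟨a, ha⟩, _, x, hx, y, hy, h⟩)
    · exact Or.inl h
    · rw [List.mem_range'_1] at ha
      refine Or.inr ⟨a, ?g1, ?g2, x, hx, y, hy, h⟩
      case g1 => omega
      case g2 => omega
  · rintro (h | ⟨a, h1, h2, x, hx, y, hy, h⟩)
    · exact Or.inl h
    · refine Or.inr ⟨⟨a, ?_⟩, List.mem_attach _ _, x, hx, y, hy, h⟩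
      rw [List.mem_range'_1]; omega

-- the loop invariant: entries below i agree (as sets) with pvReach, entries from i on are fresh
def pvInv (N : Int) (s : List (Std.TreeSet Int)) (i : Nat) : Prop :=
  s.length = 8 ∧
  (∀ j, j < i → ∀ c : Int, c ∈ s.getD j Std.TreeSet.empty ↔ c ∈ pvReach N (j + 1)) ∧
  (∀ j, i ≤ j → j < 8 →
    s.getD j Std.TreeSet.empty = Std.TreeSet.empty.insert (repInt N (j + 1)))

theorem pvInitA_getD (N : Int) (j : Nat) (hj : j < 8) :
    (pvInitA N).getD j Std.TreeSet.empty = Std.TreeSet.empty.insert (repInt N (j + 1)) := by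
  simp only [pvInitA, List.getD_eq_getElem?_getD]
  rw [List.getElem?_map]
  simp [List.getElem?_range hj]

theorem pvInv_init (N : Int) : pvInv N (pvInitA N) 1 := by
  refine ⟨by simp [pvInitA], ?_, fun j h1 h2 => pvInitA_getD N j h2⟩
  intro j hj c
  interval_cases j
  rw [mem_pvReach, pvInitA_getD N 0 (by omega), mem_singletonI]
  constructor
  · exact Or.inl
  · rintro (h | ⟨a, h1, h2, _⟩)
    · exact h
    · omega

theorem mem_build_iff_reach (N : Int) (s : List (Std.TreeSet Int)) (i : Nat)
    (hinv : pvInv N s i) (hi : i < 8) (c : Int) :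
    c ∈ pvBuildA s i ↔ c ∈ pvReach N (i + 1) := by
  obtain ⟨hlen, hlo, hhi⟩ := hinv
  rw [mem_pvBuildA, mem_pvReach, hhi i le_rfl hi, mem_singletonI]
  constructor
  · rintro (h | ⟨j, hj, a, ha, b, hb, h⟩)
    · exact Or.inl h
    · rw [List.mem_range] at hj
      refine Or.inr ⟨j + 1, by omega, by omega, a, ?_, b, ?_, h⟩
      · exact (hlo j hj a).1 ha
      · have : i + 1 - (j + 1) = i - j - 1 + 1 := by omega
        rw [this]
        exact (hlo (i - j - 1) (by omega) b).1 hb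
  · rintro (rfl | ⟨a, h1, h2, x, hx, y, hy, h⟩)
    · exact Or.inl rfl
    · refine Or.inr ⟨a - 1, by rw [List.mem_range]; omega, x, ?_, y, ?_, h⟩
      · have : a - 1 + 1 = a := by omega
        exact (hlo (a - 1) (by omega) x).2 (by rw [this]; exact hx)
      · have : i - (a - 1) - 1 + 1 = i + 1 - a := by omega
        exact (hlo (i - (a - 1) - 1) (by omega) y).2 (by rw [this]; exact hy)

theorem pvInv_step (N : Int) (s : List (Std.TreeSet Int)) (i : Nat)
    (hinv : pvInv N s i) (hi : i < 8) :
    pvInv N (s.set i (pvBuildA s i)) (i + 1) := by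
  obtain ⟨hlen, hlo, hhi⟩ := hinv
  have hgetD : ∀ j, (s.set i (pvBuildA s i)).getD j Std.TreeSet.empty =
      if j = i then pvBuildA s i else s.getD j Std.TreeSet.empty := by
    intro j
    by_cases hji : j = i
    · rw [if_pos hji, hji]
      simp [List.getD_eq_getElem?_getD, List.getElem?_set_self (show i < s.length by omega)]
    · rw [if_neg hji]
      simp [List.getD_eq_getElem?_getD, List.getElem?_set_ne (fun hc => hji hc.symm)]
  refine ⟨by simpa using hlen, ?_, ?_⟩
  · intro j hj c
    rw [hgetD]
    by_cases hji : j = i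
    · rw [if_pos hji, hji]
      exact mem_build_iff_reach N s i ⟨hlen, hlo, hhi⟩ hi c
    · rw [if_neg hji]
      exact hlo j (by omega) c
  · intro j h1 h2
    rw [hgetD, if_neg (by omega)]
    exact hhi j (by omega) h2

theorem loop_eq_find (N : Int) (number : Int) :
    ∀ n i s, 8 - i = n → pvInv N s i → pvLoopA number s i = pvFindB N number (i + 1) := by
  intro n
  induction n with
  | zero =>
    intro i s h hinv
    rw [pvLoopA, pvFindB]
    rw [if_neg (by omega), if_neg (by omega)]
  | succ m ih =>
    intro i s h hinv
    have hi : i < 8 := by omega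
    rw [pvLoopA, pvFindB]
    rw [if_pos hi, if_pos (show i + 1 < 9 by omega)]
    have hmem := mem_build_iff_reach N s i hinv hi number
    by_cases hm : number ∈ pvReach N (i + 1)
    · rw [if_pos (hmem.2 hm), if_pos hm]
      push_cast; ring
    · rw [if_neg (fun hc => hm (hmem.1 hc)), if_neg hm]
      exact ih (i + 1) _ (by omega) (pvInv_step N s i hinv hi)

-- ===== VERDICT (by name: the statement is the Claim_ definition above) =====
theorem solution_spec : Claim_equal_solution := by
  intro N number _ _
  unfold Spec_solution solution solution_alt
  exact loop_eq_find N number 7 1 (pvInitA N) rfl (pvInv_init N)
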